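-- pv_equiv track=rewrite | github.com/nikitabolkar123/daily_practice_problems | mon_tue_wed_pblms/algo_and_logical/repeated_subsequence.py | repeated_subsequence
-- ===== SOURCE A (Python) =====
-- def repeated_subsequence(str):
--     n = len(str)
--     dp = [[0] * n for _ in range(n)]  # dp is a 2D array of size n x n initialize to all zeros
--
--     for i in range(n):
--         for j in range(i + 1, n):
--             if str[i] == str[j]:
--                 dp[i][j] = dp[i - 1][j - 1] + 1
--             else:
--                 dp[i][j] = max(dp[i - 1][j], dp[i][j - 1])
--
--             if dp[i][j] >= 2:
--                 return True
--
--     return False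
-- ===== SOURCE B (Python) =====
-- def repeated_subsequence(str):
--     # One linear pass: record each character's first and second occurrence.
--     # A third occurrence of any character immediately yields a repeated
--     # subsequence (c c).  Otherwise a repeated subsequence of length >= 2
--     # exists iff two doubled characters have both their first occurrences
--     # and their second occurrences in the same relative order; with the
--     # pairs listed by increasing first occurrence that is just an adjacent
--     # rise in the list of second occurrences.
--     first = {}
--     second = {}
--     for i, ch in enumerate(str):
--         if ch not in first:
--             first[ch] = i
--         elif ch not in second:
--             second[ch] = i
--         else:
--             return True
--     seconds = [second[ch] for ch in first if ch in second]
--     return any(x < y for x, y in zip(seconds, seconds[1:]))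
-- ===== Notes on version B (the rewrite author's own statement) =====
-- stated objective: faster
-- what changed: Replaced the n-by-n dynamic-programming table with a single linear pass that records each character's first and second occurrence and then checks for a third occurrence or two doubled characters whose occurrence pairs are ordered the same way (an adjacent rise in the seconds listed by first occurrence).
import Mathlib
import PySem

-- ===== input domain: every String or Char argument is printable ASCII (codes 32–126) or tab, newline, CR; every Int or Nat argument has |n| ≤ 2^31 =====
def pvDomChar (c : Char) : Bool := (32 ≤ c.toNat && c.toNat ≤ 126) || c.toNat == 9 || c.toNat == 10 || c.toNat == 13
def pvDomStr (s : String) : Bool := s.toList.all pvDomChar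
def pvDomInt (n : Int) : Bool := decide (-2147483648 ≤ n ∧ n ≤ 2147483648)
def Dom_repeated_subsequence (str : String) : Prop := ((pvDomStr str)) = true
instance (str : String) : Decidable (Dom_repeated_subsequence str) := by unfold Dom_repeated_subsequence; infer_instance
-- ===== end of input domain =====

-- B replaces A's n×n dynamic-programming table by one linear pass recording each
-- character's first and second occurrence (return value only; A mutates nothing observable).

-- ===== PORT A =====
-- dp[x][y] with Python indexing (negative index wraps); the 0/[] defaults are never
-- reached on the indices A uses (they stay within [-1, n-1]).
def pvGet2 (dp : List (List Int)) (x y : Int) : Int :=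
  (PySem.List.pyGet? ((PySem.List.pyGet? dp x).getD []) y).getD 0

-- one body of A's inner loop: the assignment to dp[i][j] (i, j are loop indices, in range)
def pvAStep (cs : List Char) (i j : Nat) (dp : List (List Int)) : List (List Int) :=
  let v : Int :=
    if (PySem.List.pyGet? cs (i : Int)).getD ' ' = (PySem.List.pyGet? cs (j : Int)).getD ' ' then
      pvGet2 dp ((i : Int) - 1) ((j : Int) - 1) + 1
    else
      max (pvGet2 dp ((i : Int) - 1) (j : Int)) (pvGet2 dp (i : Int) ((j : Int) - 1))
  dp.set i ((dp.getD i []).set j v)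

-- 'for j in range(i+1, n)' with the early 'return True' (= none)
def pvAInner (cs : List Char) (i : Nat) : List (List Int) → List Nat → Option (List (List Int))
  | dp, [] => some dp
  | dp, j :: js =>
    let dp' := pvAStep cs i j dp
    if 2 ≤ pvGet2 dp' (i : Int) (j : Int) then none
    else pvAInner cs i dp' js

-- 'for i in range(n)'
def pvAOuter (cs : List Char) (n : Nat) : List (List Int) → List Nat → Option (List (List Int))
  | dp, [] => some dp
  | dp, i :: is =>
    match pvAInner cs i dp (List.range' (i + 1) (n - (i + 1))) with
    | none => none
    | some dp' => pvAOuter cs n dp' is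

def repeated_subsequence (str : String) : Bool :=
  let cs := str.toList
  let n := cs.length
  -- dp = [[0]*n for _ in range(n)]; range(a, b) of the Nat bounds A uses is List.range' a (b-a)
  match pvAOuter cs n (List.replicate n (List.replicate n (0 : Int))) (List.range n) with
  | none => true
  | some _ => false

-- ===== PORT B =====
-- 'for i, ch in enumerate(str)' with the early 'return True' (= none)
def pvBLoop : PySem.Dict Char Int → PySem.Dict Char Int → List (Int × Char) →
    Option (PySem.Dict Char Int × PySem.Dict Char Int)
  | first, second, [] => some (first, second)
  | first, second, (i, ch) :: rest =>
    if first.contains ch = false then pvBLoop (first.insert ch i) second rest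
    else if second.contains ch = false then pvBLoop first (second.insert ch i) rest
    else none

def repeated_subsequence_alt (str : String) : Bool :=
  match pvBLoop PySem.Dict.empty PySem.Dict.empty (PySem.List.enumerate str.toList 0) with
  | none => true
  | some (first, second) =>
    -- seconds = [second[ch] for ch in first if ch in second]  (the lookup is guarded, so getD's
    -- default is never reached)
    let seconds := (first.keys.filter (fun ch => second.contains ch)).map
      (fun ch => second.getD ch 0)
    -- any(x < y for x, y in zip(seconds, seconds[1:]))
    (seconds.zip (seconds.drop 1)).any (fun p => decide (p.1 < p.2))

-- ===== PRECONDITION & SPEC =====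
def Spec_repeated_subsequence (str : String) (out : Bool) : Prop := out = repeated_subsequence_alt str
instance (str : String) (out : Bool) : Decidable (Spec_repeated_subsequence str out) := by unfold Spec_repeated_subsequence; infer_instance

-- ===== CLAIM (what is proved, stated in full; the proofs are below) =====
def Claim_equal_repeated_subsequence : Prop := ∀ (str : String), Dom_repeated_subsequence str → Spec_repeated_subsequence str (repeated_subsequence str)

-- ===== LEMMAS AND PROOFS =====

-- character of cs at index t, as both ports read it
def pvCh (cs : List Char) (t : Nat) : Char := cs.getD t ' '

-- the value A's dp table stores at (i, j) (0 for the never-written cells)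
def pvD (cs : List Char) (i j : Nat) : Int :=
  if _h : i < j ∧ j < cs.length then
    if pvCh cs i = pvCh cs j then
      (if _hi : i = 0 then 0 else pvD cs (i - 1) (j - 1)) + 1
    else
      max (if _hi : i = 0 then 0 else pvD cs (i - 1) j)
          (if _hj : j = i + 1 then 0 else pvD cs i (j - 1))
  else 0
termination_by i + j
decreasing_by all_goals omega

-- the common witness pattern: two matched pairs (a,b), (c,d), the second dominating the first
def pvPat (cs : List Char) : Prop :=
  ∃ a b c d : Nat, a < b ∧ c < d ∧ a < c ∧ b < d ∧ d < cs.length ∧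
    pvCh cs a = pvCh cs b ∧ pvCh cs c = pvCh cs d

theorem pvD_nonneg (cs : List Char) (i j : Nat) : 0 ≤ pvD cs i j := by
  fun_induction pvD cs i j <;> first | omega | (split_ifs <;> omega)

theorem pvD_one_elim (cs : List Char) (i j : Nat) (h1 : 1 ≤ pvD cs i j) :
    ∃ a b, a ≤ i ∧ b ≤ j ∧ a < b ∧ pvCh cs a = pvCh cs b := by
  fun_induction pvD cs i j with
  | case1 i j h hc ih => exact ⟨i, j, le_refl _, le_refl _, h.1, hc⟩
  | case2 i j h hc ih1 ih2 =>
      rcases le_max_iff.mp h1 with h2 | h2 <;> split_ifs at h2 with hg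
      · omega
      · obtain ⟨a, b, ha, hb, hab, hcc⟩ := ih1 hg h2
        exact ⟨a, b, by omega, hb, hab, hcc⟩
      · omega
      · obtain ⟨a, b, ha, hb, hab, hcc⟩ := ih2 h2
        exact ⟨a, b, ha, by omega, hab, hcc⟩
  | case3 i j h => omega

theorem pvD_two_elim (cs : List Char) (i j : Nat) (h2 : 2 ≤ pvD cs i j) : pvPat cs := by
  fun_induction pvD cs i j with
  | case1 i j h hc ih =>
      split_ifs at h2 with hi
      · omega
      · obtain ⟨a, b, ha, hb, hab, hcc⟩ := pvD_one_elim cs (i - 1) (j - 1) (by omega)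
        exact ⟨a, b, i, j, hab, h.1, by omega, by omega, h.2, hcc, hc⟩
  | case2 i j h hc ih1 ih2 =>
      rcases le_max_iff.mp h2 with h3 | h3 <;> split_ifs at h3 with hg
      · omega
      · exact ih1 hg h3
      · omega
      · exact ih2 h3
  | case3 i j h => omega

theorem pvD_one_intro (cs : List Char) (a b : Nat) (hab : a < b)
    (hcc : pvCh cs a = pvCh cs b) :
    ∀ i j, a ≤ i → b ≤ j → i < j → j < cs.length → 1 ≤ pvD cs i j := by
  have main : ∀ k i j, i + j ≤ k → a ≤ i → b ≤ j → i < j → j < cs.length → 1 ≤ pvD cs i j := by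
    intro k
    induction k with
    | zero => intro i j hk ha hb hij hjn; omega
    | succ k ih =>
      intro i j hk ha hb hij hjn
      rw [pvD, dif_pos ⟨hij, hjn⟩]
      by_cases hc : pvCh cs i = pvCh cs j
      · rw [if_pos hc]
        have := pvD_nonneg cs (i - 1) (j - 1)
        split_ifs <;> omega
      · rw [if_neg hc]
        rcases Nat.lt_or_ge a i with hai | hai
        · have hi0 : ¬ i = 0 := by omega
          refine le_max_iff.mpr (Or.inl ?_)
          rw [dif_neg hi0]
          exact ih (i - 1) j (by omega) (by omega) hb (by omega) hjn
        · have hia : i = a := by omega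
          have hjb : ¬ j = b := by
            intro e
            exact hc (by rw [hia, e]; exact hcc)
          have hj1 : ¬ j = i + 1 := by omega
          refine le_max_iff.mpr (Or.inr ?_)
          rw [dif_neg hj1]
          exact ih i (j - 1) (by omega) ha (by omega) (by omega) (by omega)
  exact fun i j ha hb hij hjn => main (i + j) i j le_rfl ha hb hij hjn

theorem pvHit_iff_pat (cs : List Char) :
    (∃ i j, i < j ∧ j < cs.length ∧ 2 ≤ pvD cs i j) ↔ pvPat cs := by
  constructor
  · rintro ⟨i, j, hij, hj, h2⟩
    exact pvD_two_elim cs i j h2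
  · rintro ⟨a, b, c, d, hab, hcd, hac, hbd, hd, h1, h2⟩
    refine ⟨c, d, hcd, hd, ?_⟩
    rw [pvD, dif_pos ⟨hcd, hd⟩, if_pos h2]
    have hc0 : ¬ c = 0 := by omega
    rw [dif_neg hc0]
    have := pvD_one_intro cs a b hab h1 (c - 1) (d - 1) (by omega) (by omega) (by omega) (by omega)
    omega
-- the dp entry at (r, c), read with defaults (total)
def pvEnt (dp : List (List Int)) (r c : Nat) : Int := (dp.getD r []).getD c 0

-- invariant of A's table: all cells strictly before (i, j) in loop order hold pvD, the rest 0
def pvTab (cs : List Char) (i j : Nat) (dp : List (List Int)) : Prop :=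
  dp.length = cs.length ∧
  (∀ r, r < cs.length → (dp.getD r []).length = cs.length) ∧
  ∀ r c, r < cs.length → c < cs.length →
    pvEnt dp r c = if r < c ∧ (r < i ∨ (r = i ∧ c < j)) then pvD cs r c else 0

theorem pvGet2_natCast (dp : List (List Int)) (r c : Nat) :
    pvGet2 dp (r : Int) (c : Int) = pvEnt dp r c := by
  simp [pvGet2, pvEnt, List.getD_eq_getElem?_getD]

theorem pvGet2_negRow (dp : List (List Int)) (_hne : dp ≠ []) (c : Nat) :
    pvGet2 dp (-1) (c : Int) = pvEnt dp (dp.length - 1) c := by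
  simp [pvGet2, pvEnt, PySem.List.pyGet?_neg_one, List.getLast?_eq_getElem?,
    List.getD_eq_getElem?_getD]

theorem pvAStep_spec (cs : List Char) (i j : Nat) (dp : List (List Int))
    (ht : pvTab cs i j dp) (hij : i < j) (hj : j < cs.length) :
    pvAStep cs i j dp = dp.set i ((dp.getD i []).set j (pvD cs i j)) := by
  obtain ⟨hlen, hrow, hent⟩ := ht
  have hn : 0 < cs.length := by omega
  have hin : i < cs.length := lt_trans hij hj
  have hne : dp ≠ [] := by
    intro e
    rw [e] at hlen
    simp at hlen
    omega
  have hchar : ∀ t : Nat, (PySem.List.pyGet? cs (t : Int)).getD ' ' = pvCh cs t := by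
    intro t
    simp [pvCh, List.getD_eq_getElem?_getD]
  have hunfold : pvAStep cs i j dp = dp.set i ((dp.getD i []).set j
      (if (PySem.List.pyGet? cs (i : Int)).getD ' ' = (PySem.List.pyGet? cs (j : Int)).getD ' '
       then pvGet2 dp ((i : Int) - 1) ((j : Int) - 1) + 1
       else max (pvGet2 dp ((i : Int) - 1) (j : Int)) (pvGet2 dp (i : Int) ((j : Int) - 1)))) := rfl
  rw [hunfold]
  congr 1
  congr 1
  rw [hchar i, hchar j, pvD, dif_pos ⟨hij, hj⟩]
  by_cases hc : pvCh cs i = pvCh cs j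
  · rw [if_pos hc, if_pos hc]
    congr 1
    by_cases hi : i = 0
    · subst hi
      have e1 : ((0 : Nat) : Int) - 1 = -1 := by norm_num
      have e2 : ((j : Int) - 1) = ((j - 1 : Nat) : Int) := by omega
      rw [e1, e2, pvGet2_negRow dp hne, dif_pos rfl, hlen]
      rw [hent (cs.length - 1) (j - 1) (by omega) (by omega), if_neg (by omega)]
    · have e1 : ((i : Int) - 1) = ((i - 1 : Nat) : Int) := by omega
      have e2 : ((j : Int) - 1) = ((j - 1 : Nat) : Int) := by omega
      rw [e1, e2, pvGet2_natCast, dif_neg hi]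
      rw [hent (i - 1) (j - 1) (by omega) (by omega), if_pos (by omega)]
  · rw [if_neg hc, if_neg hc]
    congr 1
    · by_cases hi : i = 0
      · subst hi
        have e1 : ((0 : Nat) : Int) - 1 = -1 := by norm_num
        rw [e1, pvGet2_negRow dp hne, dif_pos rfl, hlen]
        rw [hent (cs.length - 1) j (by omega) hj, if_neg (by omega)]
      · have e1 : ((i : Int) - 1) = ((i - 1 : Nat) : Int) := by omega
        rw [e1, pvGet2_natCast, dif_neg hi]
        rw [hent (i - 1) j (by omega) hj, if_pos (by omega)]
    · have e2 : ((j : Int) - 1) = ((j - 1 : Nat) : Int) := by omega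
      rw [e2, pvGet2_natCast]
      by_cases hj1 : j = i + 1
      · rw [dif_pos hj1, hent i (j - 1) hin (by omega), if_neg (by omega)]
      · rw [dif_neg hj1, hent i (j - 1) hin (by omega), if_pos (by omega)]

theorem pvSet_tab (cs : List Char) (i j : Nat) (dp : List (List Int))
    (ht : pvTab cs i j dp) (hij : i < j) (hj : j < cs.length) :
    pvTab cs i (j + 1) (dp.set i ((dp.getD i []).set j (pvD cs i j))) ∧
    pvEnt (dp.set i ((dp.getD i []).set j (pvD cs i j))) i j = pvD cs i j := by
  obtain ⟨hlen, hrow, hent⟩ := ht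
  have hin : i < cs.length := lt_trans hij hj
  set row' := (dp.getD i []).set j (pvD cs i j) with hrow'
  have hget : ∀ (l : List (List Int)) (r : Nat), l.getD r [] = l[r]?.getD [] := by
    intro l r
    simp [List.getD_eq_getElem?_getD]
  have hget' : ∀ r, r < cs.length → (dp.set i row').getD r [] = if r = i then row' else dp.getD r [] := by
    intro r hr
    rw [hget, hget, List.getElem?_set]
    by_cases h1 : i = r
    · subst h1
      rw [if_pos rfl, if_pos (by omega : i < dp.length), if_pos rfl]
      rfl
    · rw [if_neg h1, if_neg (by omega : ¬ r = i)]
  have hrl : row'.length = cs.length := by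
    rw [hrow', List.length_set]
    exact hrow i hin
  have hre : ∀ c, c < cs.length → row'.getD c 0 = if c = j then pvD cs i j else pvEnt dp i c := by
    intro c hc
    have hjlen : j < (dp[i]?.getD ([] : List Int)).length := by
      rw [← hget]
      rw [hrow i hin]
      omega
    simp only [hrow', pvEnt, List.getD_eq_getElem?_getD, List.getElem?_set]
    by_cases h1 : j = c
    · subst h1
      rw [if_pos rfl, if_pos hjlen, if_pos rfl]
      rfl
    · rw [if_neg h1, if_neg (by omega : ¬ c = j)]
  have hentry : ∀ r c, r < cs.length → c < cs.length →
      pvEnt (dp.set i row') r c = if r < c ∧ (r < i ∨ (r = i ∧ c < j + 1)) then pvD cs r c else 0 := by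
    intro r c hr hc
    rw [pvEnt, hget' r hr]
    by_cases e : r = i
    · subst e
      rw [if_pos rfl]
      have : row'.getD c 0 = if c = j then pvD cs r j else pvEnt dp r c := hre c hc
      rw [this]
      by_cases ec : c = j
      · subst ec
        rw [if_pos rfl, if_pos (by omega)]
      · rw [if_neg ec, hent r c hr hc]
        by_cases hd : r < c ∧ (r < r ∨ (r = r ∧ c < j))
        · rw [if_pos hd, if_pos (by omega)]
        · rw [if_neg hd, if_neg (by omega)]
    · rw [if_neg e, ← pvEnt, hent r c hr hc]
      by_cases hd : r < c ∧ (r < i ∨ (r = i ∧ c < j))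
      · rw [if_pos hd, if_pos (by omega)]
      · rw [if_neg hd, if_neg (by omega)]
  refine ⟨⟨by rw [List.length_set]; exact hlen, ?_, hentry⟩, ?_⟩
  · intro r hr
    rw [hget' r hr]
    split_ifs with e
    · exact hrl
    · exact hrow r hr
  · rw [hentry i j hin hj, if_pos (by omega)]
theorem pvAInner_spec (cs : List Char) (i : Nat) :
    ∀ m j dp, i < j → j + m = cs.length → pvTab cs i j dp →
      (pvAInner cs i dp (List.range' j m) = none →
        ∃ c, j ≤ c ∧ c < cs.length ∧ 2 ≤ pvD cs i c) ∧
      (∀ dp', pvAInner cs i dp (List.range' j m) = some dp' →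
        pvTab cs i cs.length dp' ∧ ∀ c, j ≤ c → c < cs.length → pvD cs i c < 2) := by
  intro m
  induction m with
  | zero =>
    intro j dp hij hm ht
    constructor
    · intro h
      simp [pvAInner] at h
    · intro dp' h
      simp only [List.range'_zero, pvAInner, Option.some.injEq] at h
      subst h
      have hjn : j = cs.length := by omega
      subst hjn
      exact ⟨ht, fun c hc hcn => by omega⟩
  | succ m ih =>
    intro j dp hij hm ht
    have hj : j < cs.length := by omega
    have hstep := pvAStep_spec cs i j dp ht hij hj
    have hset := pvSet_tab cs i j dp ht hij hj
    have hread : pvGet2 (pvAStep cs i j dp) (i : Int) (j : Int) = pvD cs i j := by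
      rw [hstep, pvGet2_natCast]
      exact hset.2
    rw [List.range'_succ]
    have hunf : pvAInner cs i dp (j :: List.range' (j + 1) m) =
        if 2 ≤ pvGet2 (pvAStep cs i j dp) (i : Int) (j : Int) then none
        else pvAInner cs i (pvAStep cs i j dp) (List.range' (j + 1) m) := rfl
    rw [hunf, hread]
    by_cases hhit : 2 ≤ pvD cs i j
    · rw [if_pos hhit]
      refine ⟨fun _ => ⟨j, le_rfl, hj, hhit⟩, fun dp' h => by cases h⟩
    · rw [if_neg hhit, hstep]
      have hrec := ih (j + 1) (dp.set i ((dp.getD i []).set j (pvD cs i j))) (by omega) (by omega) hset.1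
      constructor
      · intro h
        obtain ⟨c, hc1, hc2, hc3⟩ := hrec.1 h
        exact ⟨c, by omega, hc2, hc3⟩
      · intro dp' h
        obtain ⟨ht', hmiss⟩ := hrec.2 dp' h
        refine ⟨ht', ?_⟩
        intro c hc hcn
        rcases Nat.eq_or_lt_of_le hc with e | l
        · subst e; omega
        · exact hmiss c l hcn

theorem pvTab_shift (cs : List Char) (i : Nat) (dp : List (List Int))
    (ht : pvTab cs i cs.length dp) : pvTab cs (i + 1) (i + 2) dp := by
  obtain ⟨h1, h2, h3⟩ := ht
  refine ⟨h1, h2, ?_⟩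
  intro r c hr hc
  rw [h3 r c hr hc]
  by_cases hd : r < c ∧ (r < i ∨ (r = i ∧ c < cs.length))
  · rw [if_pos hd, if_pos (by omega)]
  · rw [if_neg hd, if_neg (by omega)]

theorem pvAOuter_spec (cs : List Char) :
    ∀ m i dp, i + m = cs.length → pvTab cs i (i + 1) dp →
      (pvAOuter cs cs.length dp (List.range' i m) = none →
        ∃ a b, a < b ∧ b < cs.length ∧ 2 ≤ pvD cs a b) ∧
      (∀ dp', pvAOuter cs cs.length dp (List.range' i m) = some dp' →
        ∀ a b, i ≤ a → a < b → b < cs.length → pvD cs a b < 2) := by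
  intro m
  induction m with
  | zero =>
    intro i dp hm ht
    constructor
    · intro h
      simp [pvAOuter] at h
    · intro dp' h a b ha hab hb
      omega
  | succ m ih =>
    intro i dp hm ht
    rw [List.range'_succ]
    have hinner := pvAInner_spec cs i (cs.length - (i + 1)) (i + 1) dp (by omega) (by omega) ht
    have hunf : pvAOuter cs cs.length dp (i :: List.range' (i + 1) m) =
        match pvAInner cs i dp (List.range' (i + 1) (cs.length - (i + 1))) with
        | none => none
        | some dp' => pvAOuter cs cs.length dp' (List.range' (i + 1) m) := rfl
    rw [hunf]
    cases hres : pvAInner cs i dp (List.range' (i + 1) (cs.length - (i + 1))) with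
    | none =>
      obtain ⟨c, hc1, hc2, hc3⟩ := hinner.1 hres
      exact ⟨fun _ => ⟨i, c, by omega, hc2, hc3⟩, fun dp' h => by cases h⟩
    | some dp1 =>
      obtain ⟨ht1, hmiss⟩ := hinner.2 dp1 hres
      have hrec := ih (i + 1) dp1 (by omega) (pvTab_shift cs i dp1 ht1)
      constructor
      · intro h
        exact hrec.1 h
      · intro dp' h a b ha hab hb
        rcases Nat.eq_or_lt_of_le ha with e | l
        · subst e
          exact hmiss b (by omega) hb
        · exact hrec.2 dp' h a b l hab hb

theorem pvTab_init (cs : List Char) :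
    pvTab cs 0 1 (List.replicate cs.length (List.replicate cs.length (0 : Int))) := by
  refine ⟨by simp, ?_, ?_⟩
  · intro r hr
    rw [List.getD_eq_getElem?_getD, List.getElem?_replicate, if_pos hr]
    simp
  · intro r c hr hc
    simp only [pvEnt, List.getD_eq_getElem?_getD, List.getElem?_replicate, hr, hc, if_true,
      Option.getD_some]
    rw [if_neg (by omega)]

theorem pvA_iff (str : String) : repeated_subsequence str = true ↔ pvPat str.toList := by
  rw [← pvHit_iff_pat]
  have h := pvAOuter_spec str.toList str.toList.length 0
    (List.replicate str.toList.length (List.replicate str.toList.length (0 : Int)))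
    (by omega) (pvTab_init str.toList)
  have hdef : repeated_subsequence str =
      (match pvAOuter str.toList str.toList.length
        (List.replicate str.toList.length (List.replicate str.toList.length (0 : Int)))
        (List.range str.toList.length) with
       | none => true
       | some _ => false) := rfl
  rw [hdef, List.range_eq_range']
  cases hres : pvAOuter str.toList str.toList.length
      (List.replicate str.toList.length (List.replicate str.toList.length (0 : Int)))
      (List.range' 0 str.toList.length) with
  | none =>
    exact ⟨fun _ => h.1 hres, fun _ => rfl⟩
  | some dp' =>
    constructor
    · intro hfalse
      cases hfalse
    · rintro ⟨a, b, hab, hb, h2⟩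
      have := h.2 dp' hres a b (Nat.zero_le a) hab hb
      omega
-- ===== B side: occurrence lists =====

-- indices t < k with cs[t] = c, in increasing order
def pvOcc (cs : List Char) (k : Nat) (c : Char) : List Nat :=
  (List.range k).filter (fun t => pvCh cs t = c)

theorem pvOcc_zero (cs : List Char) (c : Char) : pvOcc cs 0 c = [] := rfl

theorem pvOcc_succ (cs : List Char) (k : Nat) (c : Char) :
    pvOcc cs (k + 1) c = pvOcc cs k c ++ (if pvCh cs k = c then [k] else []) := by
  rw [pvOcc, List.range_succ, List.filter_append, pvOcc]
  congr 1
  by_cases h : pvCh cs k = c <;> simp [h]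

theorem pvOcc_mem (cs : List Char) (k : Nat) (c : Char) (t : Nat) :
    t ∈ pvOcc cs k c ↔ t < k ∧ pvCh cs t = c := by
  simp [pvOcc, List.mem_filter]

theorem pvOcc_pairwise (cs : List Char) (k : Nat) (c : Char) :
    (pvOcc cs k c).Pairwise (· < ·) :=
  List.pairwise_lt_range.sublist List.filter_sublist

theorem pvOcc_prefix (cs : List Char) (k k' : Nat) (h : k ≤ k') (c : Char) :
    pvOcc cs k c <+: pvOcc cs k' c := by
  have : List.range k <+: List.range k' := by
    have e : List.take k (List.range k') = List.range k := by
      rw [List.take_range]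
      congr 1
      omega
    rw [← e]
    exact List.take_prefix _ _
  exact this.filter _

theorem pvOcc_getElem?_of_prefix (cs : List Char) (k k' : Nat) (h : k ≤ k') (c : Char)
    (u : Nat) (hu : u < (pvOcc cs k c).length) :
    (pvOcc cs k' c)[u]? = (pvOcc cs k c)[u]? := by
  obtain ⟨t, ht⟩ := pvOcc_prefix cs k k' h c
  rw [← ht, List.getElem?_append_left hu]

-- the two-member characterisation under "every character occurs at most twice"
theorem pvOcc_pair (cs : List Char) (a b : Nat) (hab : a < b) (hb : b < cs.length)
    (hch : pvCh cs a = pvCh cs b) (hle : (pvOcc cs cs.length (pvCh cs a)).length ≤ 2) :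
    pvOcc cs cs.length (pvCh cs a) = [a, b] := by
  have hma : a ∈ pvOcc cs cs.length (pvCh cs a) := (pvOcc_mem _ _ _ _).mpr ⟨by omega, rfl⟩
  have hmb : b ∈ pvOcc cs cs.length (pvCh cs a) := (pvOcc_mem _ _ _ _).mpr ⟨hb, hch.symm⟩
  have hp := pvOcc_pairwise cs cs.length (pvCh cs a)
  match hocc : pvOcc cs cs.length (pvCh cs a) with
  | [] => rw [hocc] at hma; cases hma
  | [x] =>
    rw [hocc] at hma hmb
    simp at hma hmb
    omega
  | [x, y] =>
    rw [hocc] at hma hmb hp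
    simp at hma hmb
    have hxy : x < y := by
      rcases List.pairwise_cons.mp hp with ⟨h1, _⟩
      exact h1 y (by simp)
    rcases hma with rfl | rfl <;> rcases hmb with rfl | rfl <;> first | rfl | omega
  | x :: y :: z :: t =>
    rw [hocc] at hle
    simp at hle

-- the u-th recorded occurrence, as the Python int the dicts store
def pvOptIdx (l : List Nat) (u : Nat) : Option Int := (l[u]?).map (fun t => (t : Int))

-- invariant of B's loop after the first k characters have been consumed
def pvInv (cs : List Char) (k : Nat) (first second : PySem.Dict Char Int) : Prop :=
  first.keys = PySem.Set.ofList (cs.take k) ∧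
  (∀ c, first.get? c = pvOptIdx (pvOcc cs k c) 0) ∧
  (∀ c, second.get? c = pvOptIdx (pvOcc cs k c) 1) ∧
  (∀ c, (pvOcc cs k c).length ≤ 2)

theorem pvTake_succ (cs : List Char) (k : Nat) (hk : k < cs.length) :
    cs.take (k + 1) = cs.take k ++ [pvCh cs k] := by
  rw [List.take_add_one]
  congr 1
  rw [List.getElem?_eq_getElem hk]
  simp [pvCh, List.getD_eq_getElem?_getD, List.getElem?_eq_getElem hk]

theorem pvOfList_append_singleton (l : List Char) (x : Char) :
    PySem.Set.ofList (l ++ [x]) = PySem.Set.add (PySem.Set.ofList l) x := by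
  rw [PySem.Set.ofList_eq_foldl, PySem.Set.ofList_eq_foldl, List.foldl_append]
  rfl

theorem pvAdd_of_not_mem (l : List Char) (x : Char) (h : x ∉ l) :
    PySem.Set.add (PySem.Set.ofList l) x = PySem.Set.ofList l ++ [x] := by
  unfold PySem.Set.add
  rw [if_neg]
  simp only [PySem.Set.contains, List.contains_eq_mem, PySem.Set.mem_ofList, decide_eq_true_eq]
  exact h

theorem pvAdd_of_mem (l : List Char) (x : Char) (h : x ∈ l) :
    PySem.Set.add (PySem.Set.ofList l) x = PySem.Set.ofList l := by
  unfold PySem.Set.add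
  rw [if_pos]
  simp only [PySem.Set.contains, List.contains_eq_mem, PySem.Set.mem_ofList, decide_eq_true_eq]
  exact h

theorem pvMem_take (cs : List Char) (k : Nat) (hk : k ≤ cs.length) (c : Char) :
    c ∈ cs.take k ↔ pvOcc cs k c ≠ [] := by
  constructor
  · intro hmem
    obtain ⟨u, hu, he⟩ := List.getElem_of_mem hmem
    have hul : u < k := by
      simp [List.length_take] at hu
      omega
    intro he2
    have hu2 : u ∈ pvOcc cs k c := by
      rw [pvOcc_mem]
      refine ⟨hul, ?_⟩
      rw [← he, List.getElem_take]
      simp [pvCh, List.getD_eq_getElem?_getD, List.getElem?_eq_getElem (by omega : u < cs.length)]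
    rw [he2] at hu2
    cases hu2
  · intro hne
    obtain ⟨t, hmem⟩ := List.exists_mem_of_ne_nil _ hne
    rw [pvOcc_mem] at hmem
    have ht : t < cs.length := by omega
    rw [← hmem.2]
    rw [List.mem_take_iff_getElem]
    refine ⟨t, by simp; omega, ?_⟩
    simp [pvCh, List.getD_eq_getElem?_getD, List.getElem?_eq_getElem ht]

theorem pvBLoop_spec (cs : List Char) :
    ∀ m k first second, k + m = cs.length → pvInv cs k first second →
      (pvBLoop first second (PySem.List.enumerate (cs.drop k) (k : Int)) = none →
        ∃ c, 3 ≤ (pvOcc cs cs.length c).length) ∧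
      (∀ fs, pvBLoop first second (PySem.List.enumerate (cs.drop k) (k : Int)) = some fs →
        pvInv cs cs.length fs.1 fs.2) := by
  intro m
  induction m with
  | zero =>
    intro k first second hm hinv
    have hk : k = cs.length := by omega
    subst hk
    rw [List.drop_length]
    constructor
    · intro h
      simp [PySem.List.enumerate, pvBLoop] at h
    · intro fs h
      simp only [PySem.List.enumerate, pvBLoop, Option.some.injEq] at h
      subst h
      exact hinv
  | succ m ih =>
    intro k first second hm hinv
    obtain ⟨hkeys, hfst, hsnd, hlen⟩ := hinv
    have hk : k < cs.length := by omega
    have hdrop : cs.drop k = pvCh cs k :: cs.drop (k + 1) := by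
      rw [List.drop_eq_getElem_cons hk]
      congr 1
      simp [pvCh, List.getD_eq_getElem?_getD, List.getElem?_eq_getElem hk]
    rw [hdrop, PySem.List.enumerate_cons]
    have hcast : (k : Int) + 1 = ((k + 1 : Nat) : Int) := by push_cast; ring
    rw [hcast]
    have hcontains_first : first.contains (pvCh cs k) = !((pvOcc cs k (pvCh cs k)).isEmpty) := by
      rw [PySem.Dict.contains_eq_isSome_get?, hfst _]
      cases hocc : pvOcc cs k (pvCh cs k) with
      | nil => simp [pvOptIdx]
      | cons x t => simp [pvOptIdx]
    have hcontains_second : second.contains (pvCh cs k) = decide (2 ≤ (pvOcc cs k (pvCh cs k)).length) := by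
      rw [PySem.Dict.contains_eq_isSome_get?, hsnd _]
      rcases hocc : pvOcc cs k (pvCh cs k) with _ | ⟨x, _ | ⟨y, t⟩⟩ <;> simp [pvOptIdx]
    by_cases hc1 : pvOcc cs k (pvCh cs k) = []
    · -- first occurrence of this character: first[ch] = k
      have hb1 : first.contains (pvCh cs k) = false := by
        rw [hcontains_first, hc1]
        rfl
      have hunf : pvBLoop first second (((k : Int), pvCh cs k) :: PySem.List.enumerate (cs.drop (k + 1)) ((k + 1 : Nat) : Int)) =
          pvBLoop (first.insert (pvCh cs k) (k : Int)) second (PySem.List.enumerate (cs.drop (k + 1)) ((k + 1 : Nat) : Int)) := by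
        rw [pvBLoop, hb1]
        rfl
      rw [hunf]
      refine ih (k + 1) (first.insert (pvCh cs k) (k : Int)) second (by omega) ⟨?_, ?_, ?_, ?_⟩
      · rw [PySem.Dict.keys_insert_of_not_contains first _ hb1, hkeys,
          pvTake_succ cs k hk, pvOfList_append_singleton, pvAdd_of_not_mem]
        rw [pvMem_take cs k (by omega)]
        simp [hc1]
      · intro c
        rw [PySem.Dict.get?_insert, pvOcc_succ]
        by_cases hcc : c = pvCh cs k
        · subst hcc
          rw [if_pos rfl, hc1, if_pos rfl]
          rfl
        · rw [if_neg hcc, hfst c, if_neg (by intro e; exact hcc e.symm)]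
          simp
      · intro c
        rw [hsnd c, pvOcc_succ]
        by_cases hcc : pvCh cs k = c
        · rw [if_pos hcc, ← hcc, hc1]
          rfl
        · rw [if_neg hcc]
          simp
      · intro c
        rw [pvOcc_succ]
        by_cases hcc : pvCh cs k = c
        · rw [if_pos hcc, ← hcc, hc1]
          simp
        · rw [if_neg hcc]
          simpa using hlen c
    · by_cases hc2 : 2 ≤ (pvOcc cs k (pvCh cs k)).length
      · -- third occurrence: the loop returns True
        have hb1 : first.contains (pvCh cs k) = true := by
          rw [hcontains_first]
          simp [hc1]
        have hb2 : second.contains (pvCh cs k) = true := by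
          rw [hcontains_second]
          simpa using hc2
        have hunf : pvBLoop first second (((k : Int), pvCh cs k) :: PySem.List.enumerate (cs.drop (k + 1)) ((k + 1 : Nat) : Int)) =
            none := by
          rw [pvBLoop, hb1, hb2]
          rfl
        rw [hunf]
        constructor
        · intro _
          refine ⟨pvCh cs k, ?_⟩
          have h1 : (pvOcc cs (k + 1) (pvCh cs k)).length = (pvOcc cs k (pvCh cs k)).length + 1 := by
            rw [pvOcc_succ, if_pos rfl, List.length_append]
            rfl
          have h2 : (pvOcc cs (k + 1) (pvCh cs k)).length ≤ (pvOcc cs cs.length (pvCh cs k)).length :=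
            (pvOcc_prefix cs (k + 1) cs.length (by omega) _).sublist.length_le
          omega
        · intro fs h
          cases h
      · -- second occurrence: second[ch] = k
        have hb1 : first.contains (pvCh cs k) = true := by
          rw [hcontains_first]
          simp [hc1]
        have hb2 : second.contains (pvCh cs k) = false := by
          rw [hcontains_second]
          simpa using hc2
        have hone : (pvOcc cs k (pvCh cs k)).length = 1 := by
          have := List.length_pos_iff.mpr hc1
          omega
        have hunf : pvBLoop first second (((k : Int), pvCh cs k) :: PySem.List.enumerate (cs.drop (k + 1)) ((k + 1 : Nat) : Int)) =
            pvBLoop first (second.insert (pvCh cs k) (k : Int)) (PySem.List.enumerate (cs.drop (k + 1)) ((k + 1 : Nat) : Int)) := by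
          rw [pvBLoop, hb1, hb2]
          rfl
        rw [hunf]
        refine ih (k + 1) first (second.insert (pvCh cs k) (k : Int)) (by omega) ⟨?_, ?_, ?_, ?_⟩
        · rw [hkeys, pvTake_succ cs k hk, pvOfList_append_singleton, pvAdd_of_mem]
          rw [pvMem_take cs k (by omega)]
          exact hc1
        · intro c
          rw [hfst c, pvOcc_succ]
          by_cases hcc : pvCh cs k = c
          · rw [if_pos hcc, ← hcc]
            unfold pvOptIdx
            rw [List.getElem?_append_left (by omega)]
          · rw [if_neg hcc]
            simp
        · intro c
          rw [PySem.Dict.get?_insert, pvOcc_succ]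
          by_cases hcc : c = pvCh cs k
          · subst hcc
            rw [if_pos rfl, if_pos rfl]
            unfold pvOptIdx
            rw [List.getElem?_append_right (by omega), hone]
            simp
          · rw [if_neg hcc, hsnd c, if_neg (by intro e; exact hcc e.symm)]
            simp
        · intro c
          rw [pvOcc_succ]
          by_cases hcc : pvCh cs k = c
          · rw [if_pos hcc, ← hcc, List.length_append, hone]
            simp
          · rw [if_neg hcc]
            simpa using hlen c

-- first / second recorded occurrence of a character in all of cs
def pvFst (cs : List Char) (c : Char) : Nat := (pvOcc cs cs.length c).getD 0 0
def pvSnd (cs : List Char) (c : Char) : Nat := (pvOcc cs cs.length c).getD 1 0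

theorem pvNoRise (L : List Int)
    (h : (L.zip (L.drop 1)).any (fun p => decide (p.1 < p.2)) = false) :
    ∀ u v, u < v → v < L.length → L.getD v 0 ≤ L.getD u 0 := by
  induction L with
  | nil => intro u v _ hv; simp at hv
  | cons x t ih =>
    intro u v huv hv
    cases t with
    | nil => simp at hv; omega
    | cons y s =>
      have he : ((x :: y :: s).zip ((x :: y :: s).drop 1)) =
          (x, y) :: ((y :: s).zip ((y :: s).drop 1)) := rfl
      rw [he, List.any_cons] at h
      simp only [Bool.or_eq_false_iff] at h
      obtain ⟨h1, h2⟩ := h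
      have hxy : y ≤ x := by simpa using h1
      cases u with
      | zero =>
        have hvt : (x :: y :: s).getD v 0 = (y :: s).getD (v - 1) 0 := by
          cases v with
          | zero => omega
          | succ v' => simp
        rw [hvt, List.getD_cons_zero]
        rcases Nat.eq_or_lt_of_le (by omega : 1 ≤ v) with e | l
        · rw [← e]
          simpa using hxy
        · have := ih h2 0 (v - 1) (by omega) (by simp at hv ⊢; omega)
          rw [List.getD_cons_zero] at this
          omega
      | succ u' =>
        cases v with
        | zero => omega
        | succ v' =>
          simp only [List.getD_cons_succ]
          exact ih h2 u' v' (by omega) (by simp at hv ⊢; omega)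

theorem pvAnyRise (L : List Int)
    (h : (L.zip (L.drop 1)).any (fun p => decide (p.1 < p.2)) = true) :
    ∃ u, u + 1 < L.length ∧ L.getD u 0 < L.getD (u + 1) 0 := by
  induction L with
  | nil => simp at h
  | cons x t ih =>
    cases t with
    | nil => simp at h
    | cons y s =>
      have he : ((x :: y :: s).zip ((x :: y :: s).drop 1)) =
          (x, y) :: ((y :: s).zip ((y :: s).drop 1)) := rfl
      rw [he, List.any_cons] at h
      rcases Bool.or_eq_true_iff.mp h with h1 | h2
      · exact ⟨0, by simp, by simpa using h1⟩
      · obtain ⟨u, hu1, hu2⟩ := ih h2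
        refine ⟨u + 1, by simp at hu1 ⊢; omega, ?_⟩
        simpa using hu2

theorem pvKeys_pairwise (cs : List Char) :
    ∀ k, k ≤ cs.length →
      (PySem.Set.ofList (cs.take k)).Pairwise (fun a b => pvFst cs a < pvFst cs b) ∧
      (∀ c ∈ PySem.Set.ofList (cs.take k), pvFst cs c < k) := by
  intro k
  induction k with
  | zero =>
    intro _
    constructor
    · simp [PySem.Set.ofList]
    · intro c hc
      simp [PySem.Set.ofList] at hc
  | succ k ih =>
    intro hk1
    obtain ⟨hp, hb⟩ := ih (by omega)
    rw [pvTake_succ cs k (by omega), pvOfList_append_singleton]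
    by_cases hmem : pvCh cs k ∈ cs.take k
    · rw [pvAdd_of_mem _ _ hmem]
      exact ⟨hp, fun c hc => by have := hb c hc; omega⟩
    · rw [pvAdd_of_not_mem _ _ hmem]
      have hocc : pvOcc cs k (pvCh cs k) = [] := by
        by_contra hne
        exact hmem ((pvMem_take cs k (by omega) _).mpr hne)
      have h1 : pvOcc cs (k + 1) (pvCh cs k) = [k] := by
        rw [pvOcc_succ, hocc, if_pos rfl]
        rfl
      have hfstk : pvFst cs (pvCh cs k) = k := by
        have h2 : (pvOcc cs cs.length (pvCh cs k))[0]? = some k := by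
          rw [pvOcc_getElem?_of_prefix cs (k + 1) cs.length (by omega) _ 0 (by rw [h1]; simp), h1]
          rfl
        rw [pvFst, List.getD_eq_getElem?_getD, h2]
        rfl
      constructor
      · rw [List.pairwise_append]
        refine ⟨hp, by simp, ?_⟩
        intro a ha b hbm
        simp only [List.mem_singleton] at hbm
        subst hbm
        rw [hfstk]
        exact hb a ha
      · intro c hc
        rcases List.mem_append.mp hc with hcm | hcm
        · have := hb c hcm; omega
        · simp only [List.mem_singleton] at hcm
          subst hcm
          omega

theorem pvThree (cs : List Char) (c : Char) (h : 3 ≤ (pvOcc cs cs.length c).length) : pvPat cs := by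
  have h0 : 0 < (pvOcc cs cs.length c).length := by omega
  have h1 : 1 < (pvOcc cs cs.length c).length := by omega
  have h2 : 2 < (pvOcc cs cs.length c).length := by omega
  have hp := List.pairwise_iff_getElem.mp (pvOcc_pairwise cs cs.length c)
  have m0 := (pvOcc_mem cs cs.length c _).mp (List.getElem_mem h0)
  have m1 := (pvOcc_mem cs cs.length c _).mp (List.getElem_mem h1)
  have m2 := (pvOcc_mem cs cs.length c _).mp (List.getElem_mem h2)
  exact ⟨(pvOcc cs cs.length c)[0], (pvOcc cs cs.length c)[1],
    (pvOcc cs cs.length c)[1], (pvOcc cs cs.length c)[2],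
    hp 0 1 h0 h1 (by omega), hp 1 2 h1 h2 (by omega), hp 0 1 h0 h1 (by omega),
    hp 1 2 h1 h2 (by omega), m2.1, by rw [m0.2, m1.2], by rw [m1.2, m2.2]⟩

theorem pvCh_mem (cs : List Char) (t : Nat) (ht : t < cs.length) : pvCh cs t ∈ cs := by
  have : pvCh cs t = cs[t] := by
    simp [pvCh, List.getD_eq_getElem?_getD, List.getElem?_eq_getElem ht]
  rw [this]
  exact List.getElem_mem ht

theorem pvB_iff (str : String) : repeated_subsequence_alt str = true ↔ pvPat str.toList := by
  set cs := str.toList with hcs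
  have hinv0 : pvInv cs 0 PySem.Dict.empty PySem.Dict.empty := by
    refine ⟨?_, ?_, ?_, ?_⟩
    · simp [PySem.Dict.keys_empty, PySem.Set.ofList]
    · intro c; simp [PySem.Dict.get?_empty, pvOcc_zero, pvOptIdx]
    · intro c; simp [PySem.Dict.get?_empty, pvOcc_zero, pvOptIdx]
    · intro c; simp [pvOcc_zero]
  have hspec := pvBLoop_spec cs cs.length 0 PySem.Dict.empty PySem.Dict.empty (by omega) hinv0
  simp only [List.drop_zero, Nat.cast_zero] at hspec
  have hdef : repeated_subsequence_alt str =
      (match pvBLoop PySem.Dict.empty PySem.Dict.empty (PySem.List.enumerate cs 0) with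
       | none => true
       | some (first, second) =>
         (((first.keys.filter (fun ch => second.contains ch)).map (fun ch => second.getD ch 0)).zip
           (((first.keys.filter (fun ch => second.contains ch)).map (fun ch => second.getD ch 0)).drop 1)).any
           (fun p => decide (p.1 < p.2))) := rfl
  rw [hdef]
  cases hres : pvBLoop PySem.Dict.empty PySem.Dict.empty (PySem.List.enumerate cs 0) with
  | none =>
    obtain ⟨c, hc⟩ := hspec.1 hres
    exact ⟨fun _ => pvThree cs c hc, fun _ => rfl⟩
  | some fs =>
    obtain ⟨first, second⟩ := fs
    obtain ⟨hkeys, hfst, hsnd, hlen⟩ := hspec.2 (first, second) hres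
    rw [List.take_length] at hkeys
    have hcont : ∀ c2, second.contains c2 = decide (2 ≤ (pvOcc cs cs.length c2).length) := by
      intro c2
      rw [PySem.Dict.contains_eq_isSome_get?, hsnd c2]
      rcases hocc : pvOcc cs cs.length c2 with _ | ⟨p, _ | ⟨q, t⟩⟩ <;> simp [pvOptIdx]
    set K := (PySem.Set.ofList cs).filter (fun c2 => decide (2 ≤ (pvOcc cs cs.length c2).length)) with hK
    have hKeq : first.keys.filter (fun ch => second.contains ch) = K := by
      rw [hkeys, hK]
      exact List.filter_congr (fun x _ => hcont x)
    have hKocc : ∀ c2 ∈ K, pvOcc cs cs.length c2 = [pvFst cs c2, pvSnd cs c2] := by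
      intro c2 hc2
      have hpred : 2 ≤ (pvOcc cs cs.length c2).length := by
        have := (List.mem_filter.mp hc2).2
        simpa using this
      have hexact : (pvOcc cs cs.length c2).length = 2 := le_antisymm (hlen c2) hpred
      rcases hocc : pvOcc cs cs.length c2 with _ | ⟨p, _ | ⟨q, _ | ⟨r, t⟩⟩⟩ <;>
        rw [hocc] at hexact <;> simp at hexact
      rw [pvFst, pvSnd, hocc]
      rfl
    have hmapeq : (first.keys.filter (fun ch => second.contains ch)).map (fun ch => second.getD ch 0) =
        K.map (fun c2 => ((pvSnd cs c2 : Nat) : Int)) := by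
      rw [hKeq]
      apply List.map_congr_left
      intro c2 hc2
      have hocc2 := hKocc c2 hc2
      have hsome : (pvOcc cs cs.length c2)[1]? = some (pvSnd cs c2) := by
        rw [hocc2]
        rfl
      apply PySem.Dict.getD_of_get?_eq_some
      rw [hsnd c2, pvOptIdx, hsome]
      rfl
    have hred : (match some (first, second) with
       | none => true
       | some (first, second) =>
         (((first.keys.filter (fun ch => second.contains ch)).map (fun ch => second.getD ch 0)).zip
           (((first.keys.filter (fun ch => second.contains ch)).map (fun ch => second.getD ch 0)).drop 1)).any
           (fun p => decide (p.1 < p.2))) =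
        (((first.keys.filter (fun ch => second.contains ch)).map (fun ch => second.getD ch 0)).zip
           (((first.keys.filter (fun ch => second.contains ch)).map (fun ch => second.getD ch 0)).drop 1)).any
           (fun p => decide (p.1 < p.2)) := rfl
    rw [hred, hmapeq]
    have hKpair : K.Pairwise (fun a b => pvFst cs a < pvFst cs b) := by
      have hP := (pvKeys_pairwise cs cs.length le_rfl).1
      rw [List.take_length] at hP
      exact hP.sublist List.filter_sublist
    have hlenL : (K.map (fun c2 => ((pvSnd cs c2 : Nat) : Int))).length = K.length := by
      simp
    have hgetL : ∀ u (hu : u < K.length),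
        (K.map (fun c2 => ((pvSnd cs c2 : Nat) : Int))).getD u 0 = ((pvSnd cs (K[u]'hu) : Nat) : Int) := by
      intro u hu
      rw [List.getD_eq_getElem?_getD, List.getElem?_map, List.getElem?_eq_getElem hu]
      rfl
    constructor
    · intro hany
      obtain ⟨u, hu1, hu2⟩ := pvAnyRise _ hany
      have hub : u < K.length := by omega
      have hub1 : u + 1 < K.length := by omega
      rw [hgetL u hub, hgetL (u + 1) hub1] at hu2
      have hsnds : pvSnd cs (K[u]'hub) < pvSnd cs (K[u+1]'hub1) := by exact_mod_cast hu2
      have hfsts : pvFst cs (K[u]'hub) < pvFst cs (K[u+1]'hub1) :=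
        List.pairwise_iff_getElem.mp hKpair u (u + 1) hub hub1 (by omega)
      have hxocc := hKocc _ (List.getElem_mem hub)
      have hyocc := hKocc _ (List.getElem_mem hub1)
      have hxp := pvOcc_pairwise cs cs.length (K[u]'hub)
      rw [hxocc] at hxp
      have hxlt : pvFst cs (K[u]'hub) < pvSnd cs (K[u]'hub) := by
        rcases List.pairwise_cons.mp hxp with ⟨h1, _⟩
        exact h1 _ (by simp)
      have hyp := pvOcc_pairwise cs cs.length (K[u+1]'hub1)
      rw [hyocc] at hyp
      have hylt : pvFst cs (K[u+1]'hub1) < pvSnd cs (K[u+1]'hub1) := by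
        rcases List.pairwise_cons.mp hyp with ⟨h1, _⟩
        exact h1 _ (by simp)
      have hmx1 : pvFst cs (K[u]'hub) ∈ pvOcc cs cs.length (K[u]'hub) := by rw [hxocc]; simp
      have hmx2 : pvSnd cs (K[u]'hub) ∈ pvOcc cs cs.length (K[u]'hub) := by rw [hxocc]; simp
      have hmy1 : pvFst cs (K[u+1]'hub1) ∈ pvOcc cs cs.length (K[u+1]'hub1) := by rw [hyocc]; simp
      have hmy2 : pvSnd cs (K[u+1]'hub1) ∈ pvOcc cs cs.length (K[u+1]'hub1) := by rw [hyocc]; simp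
      rw [pvOcc_mem] at hmx1 hmx2 hmy1 hmy2
      exact ⟨pvFst cs (K[u]'hub), pvSnd cs (K[u]'hub), pvFst cs (K[u+1]'hub1), pvSnd cs (K[u+1]'hub1),
        hxlt, hylt, hfsts, hsnds, hmy2.1, by rw [hmx1.2, hmx2.2], by rw [hmy1.2, hmy2.2]⟩
    · intro hpat
      by_contra hany
      rw [Bool.not_eq_true] at hany
      obtain ⟨a, b, c2, d, hab, hcd, hac, hbd, hdn, hch1, hch2⟩ := hpat
      have hxocc : pvOcc cs cs.length (pvCh cs a) = [a, b] :=
        pvOcc_pair cs a b hab (by omega) hch1 (hlen _)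
      have hyocc : pvOcc cs cs.length (pvCh cs c2) = [c2, d] :=
        pvOcc_pair cs c2 d hcd hdn hch2 (hlen _)
      have hxK : pvCh cs a ∈ K := by
        rw [hK, List.mem_filter]
        refine ⟨(PySem.Set.mem_ofList _ _).mpr (pvCh_mem cs a (by omega)), ?_⟩
        rw [hxocc]
        simp
      have hyK : pvCh cs c2 ∈ K := by
        rw [hK, List.mem_filter]
        refine ⟨(PySem.Set.mem_ofList _ _).mpr (pvCh_mem cs c2 (by omega)), ?_⟩
        rw [hyocc]
        simp
      obtain ⟨u, hu, hxu⟩ := List.mem_iff_getElem.mp hxK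
      obtain ⟨v, hv, hyv⟩ := List.mem_iff_getElem.mp hyK
      have hfx : pvFst cs (pvCh cs a) = a := by rw [pvFst, hxocc]; rfl
      have hfy : pvFst cs (pvCh cs c2) = c2 := by rw [pvFst, hyocc]; rfl
      have hsx : pvSnd cs (pvCh cs a) = b := by rw [pvSnd, hxocc]; rfl
      have hsy : pvSnd cs (pvCh cs c2) = d := by rw [pvSnd, hyocc]; rfl
      have huv : u < v := by
        rcases Nat.lt_trichotomy u v with h | h | h
        · exact h
        · exfalso
          subst h
          have he : pvCh cs a = pvCh cs c2 := by
            rw [← hxu]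
            exact hyv
          rw [he, hfy] at hfx
          omega
        · exfalso
          have := List.pairwise_iff_getElem.mp hKpair v u hv hu h
          rw [hxu, hyv, hfx, hfy] at this
          omega
      have hle := pvNoRise _ hany u v huv (by rw [hlenL]; exact hv)
      rw [hgetL u hu, hgetL v hv, hxu, hyv, hsx, hsy] at hle
      have : d ≤ b := by exact_mod_cast hle
      omega
-- ===== VERDICT (by name: the statement is the Claim_ definition above) =====
theorem repeated_subsequence_spec : Claim_equal_repeated_subsequence := by
  intro str _
  unfold Spec_repeated_subsequence
  have hA := pvA_iff str
  have hB := pvB_iff str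
  cases hA' : repeated_subsequence str with
  | true => exact (hB.mpr (hA.mp hA')).symm
  | false =>
    cases hB' : repeated_subsequence_alt str with
    | false => rfl
    | true =>
      rw [hA.mpr (hB.mp hB')] at hA'
      cases hA'
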